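-- pv_equiv track=rewrite | github.com/FalconX777/GSAUltra2020 | src/6_Down.py | solution
-- ===== SOURCE A (Python) =====
-- def solution(a, b):
--     if len(a) == 0:
--         if len(b) == 0:
--             return 0
--         rst = abs(b[0])
--         for j in range(1,len(b)):
--             rst += abs(b[j-1]-b[j])
--         return rst
--     if len(b) == 0:
--         return solution(b,a)
--     mat = [[[0,0] for j in range(len(b)+1)] for i in range(len(a)+1)] # [d_min(a[:i],b[:j],last_pos=a[i-1]),...b[j-1]]
--     mat[1][0] = [abs(a[0]),abs(a[0])]
--     mat[0][1] = [abs(b[0]),abs(b[0])]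
--     for i in range(2,len(a)+1):
--         mat[i][0] = [mat[i-1][0][0]+abs(a[i-1]-a[i-2]),mat[i-1][0][1]+abs(a[i-1]-a[i-2])]
--     for j in range(2,len(b)+1):
--         mat[0][j] = [mat[0][j-1][1]+abs(b[j-1]-b[j-2]),mat[0][j-1][1]+abs(b[j-1]-b[j-2])]
--
--     # Loop
--     mat[1][1][0] = mat[0][1][0]+abs(a[0]-b[0])
--     mat[1][1][1] = mat[1][0][1]+abs(b[0]-a[0])
--     for j in range(2,len(b)+1):
--         mat[1][j][0] = mat[0][j][1]+abs(a[0]-b[j-1])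
--         mat[1][j][1] = min(mat[1][j-1][0]+abs(b[j-1]-a[0]),mat[1][j-1][1]+abs(b[j-1]-b[j-2]))
--
--     for i in range(2,len(a)+1):
--         mat[i][1][0] = min(mat[i-1][1][0]+abs(a[i-1]-a[i-2]),mat[i-1][1][1]+abs(a[i-1]-b[0]))
--         mat[i][1][1] = mat[i][0][0]+abs(b[0]-a[i-1])
--         for j in range(2,len(b)+1):
--             mat[i][j][0] = min(mat[i-1][j][0]+abs(a[i-1]-a[i-2]),mat[i-1][j][1]+abs(a[i-1]-b[j-1]))
--             mat[i][j][1] = min(mat[i][j-1][0]+abs(b[j-1]-a[i-1]),mat[i][j-1][1]+abs(b[j-1]-b[j-2]))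
--     return min(mat[-1][-1][0],mat[-1][-1][1])
-- ===== SOURCE B (Python) =====
-- def solution(a, b):
--     # Top-down memoized evaluation of the min-cost interleaving recurrence:
--     # a defunctionalized recursion (explicit eval/combine frame stack, so no
--     # recursion-depth limit) solves the goal state (n, m) downward, caching
--     # each state's pair (best cost ending in an a-element, ... b-element) in
--     # a dict; None marks an unreachable "last element from this side" state,
--     # so empty lists and all boundary rows fall out of one uniform rule.
--     n, m = len(a), len(b)
--
--     def add(c, d):
--         return None if c is None else c + d
--
--     def mn(x, y):
--         if x is None:
--             return y
--         if y is None: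
--             return x
--         return min(x, y)
--
--     memo = {}
--     stack = [("eval", n, m)]
--     while stack:
--         tag, i, j = stack.pop()
--         if tag == "eval":
--             if (i, j) in memo:
--                 continue
--             if i == 0 and j == 0:
--                 memo[(0, 0)] = (0, 0)
--             else:
--                 stack.append(("combine", i, j))
--                 if i >= 1:
--                     stack.append(("eval", i - 1, j))
--                 if j >= 1:
--                     stack.append(("eval", i, j - 1))
--         else:  # combine: all needed children are memoized
--             c0 = None
--             if i >= 1:
--                 p0, p1 = memo[(i - 1, j)]
--                 va = a[i - 2] if i >= 2 else 0
--                 vb = b[j - 1] if j >= 1 else 0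
--                 c0 = mn(add(p0, abs(a[i - 1] - va)), add(p1, abs(a[i - 1] - vb)))
--             c1 = None
--             if j >= 1:
--                 p0, p1 = memo[(i, j - 1)]
--                 va = a[i - 1] if i >= 1 else 0
--                 vb = b[j - 2] if j >= 2 else 0
--                 c1 = mn(add(p0, abs(b[j - 1] - va)), add(p1, abs(b[j - 1] - vb)))
--             memo[(i, j)] = (c0, c1)
--     r0, r1 = memo[(n, m)]
--     return mn(r0, r1)
-- ===== Notes on version B (the rewrite author's own statement) =====
-- stated objective: alternative
-- what changed: Replaces A's five-phase bottom-up table fill (an (n+1)x(m+1) matrix with duplicated boundary rows, special-cased row/column 1 and an empty-list branch chain) by demand-driven top-down memoized evaluation: a defunctionalized recursion (explicit eval/combine frame stack, no recursion-depth limit) solves the goal state (n,m) downward, caching one uniform two-option rule per state in a dict with None marking an unreachable 'last element from this side' state, so every boundary and empty-list case falls out of the same rule.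
import Mathlib
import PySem

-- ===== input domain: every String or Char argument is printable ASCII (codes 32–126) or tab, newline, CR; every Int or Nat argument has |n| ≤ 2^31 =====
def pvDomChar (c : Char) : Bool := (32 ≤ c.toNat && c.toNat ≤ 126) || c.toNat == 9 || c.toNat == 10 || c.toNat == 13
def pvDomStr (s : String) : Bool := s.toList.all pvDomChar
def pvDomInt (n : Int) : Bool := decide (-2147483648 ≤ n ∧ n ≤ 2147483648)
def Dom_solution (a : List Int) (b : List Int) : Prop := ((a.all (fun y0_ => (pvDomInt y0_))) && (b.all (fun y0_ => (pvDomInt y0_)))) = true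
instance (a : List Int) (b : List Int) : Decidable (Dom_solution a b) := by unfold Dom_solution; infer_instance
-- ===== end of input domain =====

-- B replaces A's five-phase bottom-up table fill by demand-driven top-down memoized
-- evaluation: a defunctionalized recursion (explicit eval/combine frame stack) solves
-- the goal state (n, m) downward, caching one uniform two-option rule per state in a
-- dict, with none marking an unreachable "last element came from this side" state
-- (objective: alternative — same O(n·m) cost, one uniform rule evaluated on demand
-- instead of five staged fill loops).

-- ===== PORT A =====
def pyAbs (x : Int) : Int := if x < 0 then -x else x
-- l[i] for an index that is nonnegative and in range at every use site (default never read)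
def elt (l : List Int) (i : Nat) : Int := l.getD i 0
-- mat[i][j] read / write on the matrix (a 2-list [d0, d1] is ported as a pair); all uses in range
def cellGet (mat : List (List (Int × Int))) (i j : Nat) : Int × Int := (mat.getD i []).getD j (0, 0)
def cellSet (mat : List (List (Int × Int))) (i j : Nat) (v : Int × Int) : List (List (Int × Int)) :=
  mat.set i ((mat.getD i []).set j v)

-- phases of A's table fill, in A's order; Python's range(2, len+1) is iterated as List.range' 2 (len-1)
-- mat, then mat[1][0] = …, mat[0][1] = …
def matP2 (a b : List Int) : List (List (Int × Int)) :=
  cellSet (cellSet (List.replicate (a.length+1) (List.replicate (b.length+1) ((0, 0) : Int × Int)))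
    1 0 (pyAbs (elt a 0), pyAbs (elt a 0))) 0 1 (pyAbs (elt b 0), pyAbs (elt b 0))
-- for i in range(2, len(a)+1): mat[i][0] = …
def colStep (a : List Int) (mat : List (List (Int × Int))) (i : Nat) : List (List (Int × Int)) :=
  cellSet mat i 0 ((cellGet mat (i-1) 0).1 + pyAbs (elt a (i-1) - elt a (i-2)),
                   (cellGet mat (i-1) 0).2 + pyAbs (elt a (i-1) - elt a (i-2)))
def matP3 (a b : List Int) : List (List (Int × Int)) :=
  (List.range' 2 (a.length-1)).foldl (colStep a) (matP2 a b)
-- for j in range(2, len(b)+1): mat[0][j] = …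
def row0Step (b : List Int) (mat : List (List (Int × Int))) (j : Nat) : List (List (Int × Int)) :=
  cellSet mat 0 j ((cellGet mat 0 (j-1)).2 + pyAbs (elt b (j-1) - elt b (j-2)),
                   (cellGet mat 0 (j-1)).2 + pyAbs (elt b (j-1) - elt b (j-2)))
def matP4 (a b : List Int) : List (List (Int × Int)) :=
  (List.range' 2 (b.length-1)).foldl (row0Step b) (matP3 a b)
-- mat[1][1][0] = …; mat[1][1][1] = …
def matP6 (a b : List Int) : List (List (Int × Int)) :=
  let m5 := cellSet (matP4 a b) 1 1 ((cellGet (matP4 a b) 0 1).1 + pyAbs (elt a 0 - elt b 0), (cellGet (matP4 a b) 1 1).2)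
  cellSet m5 1 1 ((cellGet m5 1 1).1, (cellGet m5 1 0).2 + pyAbs (elt b 0 - elt a 0))
-- for j in range(2, len(b)+1): mat[1][j][0] = …; mat[1][j][1] = …
def row1Step (a b : List Int) (mat : List (List (Int × Int))) (j : Nat) : List (List (Int × Int)) :=
  let mA := cellSet mat 1 j ((cellGet mat 0 j).2 + pyAbs (elt a 0 - elt b (j-1)), (cellGet mat 1 j).2)
  cellSet mA 1 j ((cellGet mA 1 j).1,
    min ((cellGet mA 1 (j-1)).1 + pyAbs (elt b (j-1) - elt a 0))
        ((cellGet mA 1 (j-1)).2 + pyAbs (elt b (j-1) - elt b (j-2))))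
def matP7 (a b : List Int) : List (List (Int × Int)) :=
  (List.range' 2 (b.length-1)).foldl (row1Step a b) (matP6 a b)
-- inner loop of the main fill: mat[i][j][0] = …; mat[i][j][1] = …
def cellStep (a b : List Int) (i : Nat) (mat : List (List (Int × Int))) (j : Nat) : List (List (Int × Int)) :=
  let m3 := cellSet mat i j
    (min ((cellGet mat (i-1) j).1 + pyAbs (elt a (i-1) - elt a (i-2)))
         ((cellGet mat (i-1) j).2 + pyAbs (elt a (i-1) - elt b (j-1))), (cellGet mat i j).2)
  cellSet m3 i j ((cellGet m3 i j).1,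
    min ((cellGet m3 i (j-1)).1 + pyAbs (elt b (j-1) - elt a (i-1)))
        ((cellGet m3 i (j-1)).2 + pyAbs (elt b (j-1) - elt b (j-2))))
-- outer loop of the main fill: mat[i][1][0] = …; mat[i][1][1] = …; then the inner loop
def rowStep (a b : List Int) (mat : List (List (Int × Int))) (i : Nat) : List (List (Int × Int)) :=
  let m1 := cellSet mat i 1
    (min ((cellGet mat (i-1) 1).1 + pyAbs (elt a (i-1) - elt a (i-2)))
         ((cellGet mat (i-1) 1).2 + pyAbs (elt a (i-1) - elt b 0)), (cellGet mat i 1).2)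
  let m2 := cellSet m1 i 1 ((cellGet m1 i 1).1, (cellGet m1 i 0).1 + pyAbs (elt b 0 - elt a (i-1)))
  (List.range' 2 (b.length-1)).foldl (cellStep a b i) m2
def matP8 (a b : List Int) : List (List (Int × Int)) :=
  (List.range' 2 (a.length-1)).foldl (rowStep a b) (matP7 a b)
-- the branch with both lists nonempty
def mainA (a b : List Int) : Int :=
  min (cellGet (matP8 a b) a.length b.length).1 (cellGet (matP8 a b) a.length b.length).2
-- rst = abs(b[0]); for j in range(1, len(b)): rst += abs(b[j-1]-b[j])
def chainA (b : List Int) : Int :=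
  (List.range' 1 (b.length - 1)).foldl (fun rst j => rst + pyAbs (elt b (j-1) - elt b j)) (pyAbs (elt b 0))

def solution (a : List Int) (b : List Int) : Int :=
  if a.length == 0 then
    if b.length == 0 then 0 else chainA b
  else if b.length == 0 then solution b a
  else mainA a b
termination_by (if a.length == 0 then 0 else 1)
decreasing_by simp_all

-- ===== PORT B =====
-- None if c is None else c + d
def addO (c : Option Int) (d : Int) : Option Int := c.map (fun x => x + d)
-- mn(x, y): minimum that ignores None
def mnO (x y : Option Int) : Option Int :=
  match x, y with
  | none, y => y
  | x, none => x
  | some xv, some yv => some (min xv yv)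

-- the two kinds of stack frames of B's defunctionalized recursion
inductive PvFrame : Type
  | eval : Nat → Nat → PvFrame
  | combine : Nat → Nat → PvFrame
deriving DecidableEq, Repr

-- termination measure for the while loop: an eval frame may be replaced by at most
-- two strictly lighter eval frames plus a combine frame, so the total weight drops
def pvFrameW : PvFrame → Nat
  | .eval i j => 4 ^ (i + j + 1)
  | .combine _ _ => 1
def pvStackW (k : List PvFrame) : Nat := (k.map pvFrameW).sum

-- the 'while stack:' loop of B; all state indices stay nonnegative and in range,
-- so list indices are Nat and a[i-1]/b[j-1] reads use elt (default never read);
-- memo[(i-1,j)] / memo[(i,j-1)] in the combine arm are always present (getD never read)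
def runM (a b : List Int) : List PvFrame → PySem.Dict (Nat × Nat) (Option Int × Option Int) →
    PySem.Dict (Nat × Nat) (Option Int × Option Int)
  | [], memo => memo
  | .eval i j :: k, memo =>
      if (memo.get? (i, j)).isSome then runM a b k memo
      else if i = 0 ∧ j = 0 then runM a b k (memo.insert (0, 0) (some 0, some 0))
      else runM a b ((if 1 ≤ j then [PvFrame.eval i (j-1)] else []) ++
                     (if 1 ≤ i then [PvFrame.eval (i-1) j] else []) ++
                     PvFrame.combine i j :: k) memo
  | .combine i j :: k, memo =>
      let c0 : Option Int :=
        if 1 ≤ i then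
          let p := (memo.get? (i-1, j)).getD (none, none)
          let va := if 2 ≤ i then elt a (i-2) else 0
          let vb := if 1 ≤ j then elt b (j-1) else 0
          mnO (addO p.1 (pyAbs (elt a (i-1) - va))) (addO p.2 (pyAbs (elt a (i-1) - vb)))
        else none
      let c1 : Option Int :=
        if 1 ≤ j then
          let p := (memo.get? (i, j-1)).getD (none, none)
          let va := if 1 ≤ i then elt a (i-1) else 0
          let vb := if 2 ≤ j then elt b (j-2) else 0
          mnO (addO p.1 (pyAbs (elt b (j-1) - va))) (addO p.2 (pyAbs (elt b (j-1) - vb)))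
        else none
      runM a b k (memo.insert (i, j) (c0, c1))
termination_by k _ => pvStackW k
decreasing_by
  · simp only [pvStackW, List.map_cons, List.sum_cons, pvFrameW]
    have h4 : 0 < 4 ^ (i + j + 1) := Nat.pow_pos (by norm_num)
    omega
  · simp only [pvStackW, List.map_cons, List.sum_cons, pvFrameW]
    have h4 : 0 < 4 ^ (i + j + 1) := Nat.pow_pos (by norm_num)
    omega
  · simp only [pvStackW, List.map_append, List.sum_append, List.map_cons, List.sum_cons, pvFrameW]
    have h1 : 0 < 4 ^ (i + j) := Nat.pow_pos (by norm_num)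
    have hp : (4:Nat) ^ (i + j + 1) = 4 * 4 ^ (i + j) := by rw [pow_succ]; ring
    split_ifs with hj hi hi <;>
      simp only [List.map_cons, List.map_nil, List.sum_cons, List.sum_nil, pvFrameW] <;>
      [rw [show i + (j-1) + 1 = i + j from by omega, show (i-1) + j + 1 = i + j from by omega];
       rw [show i + (j-1) + 1 = i + j from by omega];
       rw [show (i-1) + j + 1 = i + j from by omega];
       skip] <;> omega
  · simp only [pvStackW, List.map_cons, List.sum_cons, pvFrameW]
    omega

def solution_alt (a : List Int) (b : List Int) : Int :=
  let n := a.length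
  let m := b.length
  let memo := runM a b [PvFrame.eval n m] PySem.Dict.empty
  let r := (memo.get? (n, m)).getD (none, none)  -- key always present: memo[(n, m)] never raises
  (mnO r.1 r.2).getD 0  -- both components None is impossible at key (n, m)

-- ===== PRECONDITION & SPEC =====
def Spec_solution (a : List Int) (b : List Int) (out : Int) : Prop := out = solution_alt a b
instance (a : List Int) (b : List Int) (out : Int) : Decidable (Spec_solution a b out) := by unfold Spec_solution; infer_instance

-- ===== CLAIM (what is proved, stated in full; the proofs are below) =====
def Claim_equal_solution : Prop := ∀ (a : List Int) (b : List Int), Dom_solution a b → Spec_solution a b (solution a b)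

-- ===== LEMMAS AND PROOFS =====

-- the value A's table holds at cell (i, j) (0 ≤ i ≤ len a, 0 ≤ j ≤ len b), as a recurrence
def G (a b : List Int) (i j : Nat) : Int × Int :=
  if i = 0 then
    if j = 0 then (0, 0)
    else if j = 1 then (pyAbs (elt b 0), pyAbs (elt b 0))
    else ((G a b 0 (j-1)).2 + pyAbs (elt b (j-1) - elt b (j-2)),
          (G a b 0 (j-1)).2 + pyAbs (elt b (j-1) - elt b (j-2)))
  else if i = 1 then
    if j = 0 then (pyAbs (elt a 0), pyAbs (elt a 0))
    else if j = 1 then ((G a b 0 1).1 + pyAbs (elt a 0 - elt b 0),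
                        (G a b 1 0).2 + pyAbs (elt b 0 - elt a 0))
    else ((G a b 0 j).2 + pyAbs (elt a 0 - elt b (j-1)),
          min ((G a b 1 (j-1)).1 + pyAbs (elt b (j-1) - elt a 0))
              ((G a b 1 (j-1)).2 + pyAbs (elt b (j-1) - elt b (j-2))))
  else
    if j = 0 then ((G a b (i-1) 0).1 + pyAbs (elt a (i-1) - elt a (i-2)),
                   (G a b (i-1) 0).1 + pyAbs (elt a (i-1) - elt a (i-2)))
    else if j = 1 then
      (min ((G a b (i-1) 1).1 + pyAbs (elt a (i-1) - elt a (i-2)))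
           ((G a b (i-1) 1).2 + pyAbs (elt a (i-1) - elt b 0)),
       (G a b i 0).1 + pyAbs (elt b 0 - elt a (i-1)))
    else
      (min ((G a b (i-1) j).1 + pyAbs (elt a (i-1) - elt a (i-2)))
           ((G a b (i-1) j).2 + pyAbs (elt a (i-1) - elt b (j-1))),
       min ((G a b i (j-1)).1 + pyAbs (elt b (j-1) - elt a (i-1)))
           ((G a b i (j-1)).2 + pyAbs (elt b (j-1) - elt b (j-2))))
termination_by (i, j)
decreasing_by all_goals omega

-- the value B's memo holds at key (i, j), as the uniform recurrence B evaluates on demand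
def F (a b : List Int) (i j : Nat) : Option Int × Option Int :=
  if i = 0 ∧ j = 0 then (some 0, some 0)
  else
    ((if _h : 1 ≤ i then
        let p := F a b (i-1) j
        let va := if 2 ≤ i then elt a (i-2) else 0
        let vb := if 1 ≤ j then elt b (j-1) else 0
        mnO (addO p.1 (pyAbs (elt a (i-1) - va))) (addO p.2 (pyAbs (elt a (i-1) - vb)))
      else none),
     (if _h : 1 ≤ j then
        let p := F a b i (j-1)
        let va := if 1 ≤ i then elt a (i-1) else 0
        let vb := if 2 ≤ j then elt b (j-2) else 0
        mnO (addO p.1 (pyAbs (elt b (j-1) - va))) (addO p.2 (pyAbs (elt b (j-1) - vb)))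
      else none))
termination_by (i, j)
decreasing_by all_goals omega

theorem G_row0_dup (a b : List Int) (j : Nat) : (G a b 0 j).1 = (G a b 0 j).2 := by
  rw [G]; rcases j with _|_|j <;> simp

theorem G_col0_dup (a b : List Int) (i : Nat) : (G a b i 0).1 = (G a b i 0).2 := by
  rw [G]; rcases i with _|_|i <;> simp

theorem pyAbs_sub_comm (x y : Int) : pyAbs (x - y) = pyAbs (y - x) := by
  unfold pyAbs; split_ifs <;> omega

theorem F_eq_G_aux (a b : List Int) (s : Nat) : ∀ i j, i + j ≤ s →
    F a b i j = ((if i = 0 ∧ 1 ≤ j then none else some (G a b i j).1),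
                 (if j = 0 ∧ 1 ≤ i then none else some (G a b i j).2)) := by
  induction s with
  | zero =>
    intro i j h
    have hi : i = 0 := by omega
    have hj : j = 0 := by omega
    subst hi; subst hj
    simp [F, G]
  | succ s ih =>
    intro i j h
    have h00 : F a b 0 0 = (some 0, some 0) := by simp [F]
    rcases i with _|_|i <;> rcases j with _|_|j
    · simp [F, G]
    · rw [F]; simp [h00, G, mnO, addO]
    · rw [F]
      conv_rhs => rw [G]
      simp [mnO, addO, ih 0 (j+1) (by omega)]
    · rw [F]; simp [h00, G, mnO, addO]
    · rw [F]
      conv_rhs => rw [G]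
      simp [mnO, addO, ih 0 1 (by omega), ih 1 0 (by omega), G_row0_dup, G_col0_dup]
    · rw [F]
      conv_rhs => rw [G]
      simp [mnO, addO, ih 0 (j+2) (by omega), ih 1 (j+1) (by omega)]
    · rw [F]
      conv_rhs => rw [G]
      simp [mnO, addO, ih (i+1) 0 (by omega)]
    · rw [F]
      conv_rhs => rw [G]
      simp [mnO, addO, ih (i+1) 1 (by omega), ih (i+2) 0 (by omega)]
    · rw [F]
      conv_rhs => rw [G]
      simp [mnO, addO, ih (i+1) (j+2) (by omega), ih (i+2) (j+1) (by omega)]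

theorem F_eq_G (a b : List Int) (i j : Nat) :
    F a b i j = ((if i = 0 ∧ 1 ≤ j then none else some (G a b i j).1),
                 (if j = 0 ∧ 1 ≤ i then none else some (G a b i j).2)) :=
  F_eq_G_aux a b (i + j) i j le_rfl

theorem chain_fold (a b c : List Int) : ∀ i, 1 ≤ i → i ≤ c.length →
    (List.range' 1 (i-1)).foldl (fun rst j => rst + pyAbs (elt c (j-1) - elt c j)) (pyAbs (elt c 0))
      = (G c b i 0).1 := by
  intro i
  induction i with
  | zero => omega
  | succ i ih =>
    intro _ hle
    rcases Nat.eq_zero_or_pos i with h0 | h0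
    · subst h0
      rw [G]; simp
    · have hstep : List.range' 1 (i+1-1) = List.range' 1 (i-1) ++ [i] := by
        have : i - 1 + 1 = i := by omega
        rw [show i+1-1 = (i-1)+1 by omega, List.range'_concat]
        simp [show 1 + (i-1) = i by omega]
      rw [hstep, List.foldl_append]
      rw [ih h0 (by omega)]
      conv_rhs => rw [G]
      simp [h0.ne', pyAbs_sub_comm]

theorem chain_fold_row (a b : List Int) : ∀ j, 1 ≤ j →
    (List.range' 1 (j-1)).foldl (fun rst k => rst + pyAbs (elt b (k-1) - elt b k)) (pyAbs (elt b 0))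
      = (G a b 0 j).2 := by
  intro j
  induction j with
  | zero => omega
  | succ i ih =>
    intro _
    rcases Nat.eq_zero_or_pos i with h0 | h0
    · subst h0
      rw [G]; simp
    · have hstep : List.range' 1 (i+1-1) = List.range' 1 (i-1) ++ [i] := by
        rw [show i+1-1 = (i-1)+1 by omega, List.range'_concat]
        simp [show 1 + (i-1) = i by omega]
      rw [hstep, List.foldl_append]
      rw [ih h0]
      conv_rhs => rw [G]
      simp [h0.ne', pyAbs_sub_comm]

theorem chainA_eq_G_col (a b : List Int) (hn : 1 ≤ a.length) : chainA a = (G a b a.length 0).1 := by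
  unfold chainA
  exact chain_fold a b a a.length hn le_rfl

theorem chainA_eq_G_row (a b : List Int) (hm : 1 ≤ b.length) : chainA b = (G a b 0 b.length).2 := by
  unfold chainA
  exact chain_fold_row a b b.length hm

-- ===== B side: the frame machine computes F =====

-- the threaded-memo reference recursion the machine defunctionalizes: solve the
-- (i, j-1) child first, then the (i-1, j) child, then record F at (i, j)
def solveT (a b : List Int) (i j : Nat) (M : PySem.Dict (Nat × Nat) (Option Int × Option Int)) :
    PySem.Dict (Nat × Nat) (Option Int × Option Int) :=
  if (M.get? (i, j)).isSome then M
  else if i = 0 ∧ j = 0 then M.insert (0, 0) (some 0, some 0)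
  else
    let M1 := if _h : 1 ≤ j then solveT a b i (j-1) M else M
    let M2 := if _h : 1 ≤ i then solveT a b (i-1) j M1 else M1
    M2.insert (i, j) (F a b i j)
termination_by (i, j)
decreasing_by all_goals omega

def InvM (a b : List Int) (M : PySem.Dict (Nat × Nat) (Option Int × Option Int)) : Prop :=
  ∀ i j v, M.get? (i, j) = some v → v = F a b i j

theorem F_zero (a b : List Int) : F a b 0 0 = (some 0, some 0) := by simp [F]

theorem solveT_mono (a b : List Int) : ∀ s i j, i + j ≤ s →
    ∀ M p (v : Option Int × Option Int), M.get? p = some v → (solveT a b i j M).get? p = some v := by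
  intro s
  induction s with
  | zero =>
    intro i j h M p v hv
    rw [solveT]
    by_cases hs : (M.get? (i, j)).isSome
    · rw [if_pos hs]; exact hv
    · have hb : i = 0 ∧ j = 0 := by omega
      rw [if_neg hs, if_pos hb]
      rw [PySem.Dict.get?_insert]
      by_cases hp : p = ((0:Nat), (0:Nat))
      · exfalso
        have hpij : p = (i, j) := by rw [hp, hb.1, hb.2]
        rw [hpij] at hv
        rw [hv] at hs
        simp at hs
      · rw [if_neg hp]; exact hv
  | succ s ih =>
    intro i j h M p v hv
    rw [solveT]
    by_cases hs : (M.get? (i, j)).isSome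
    · rw [if_pos hs]; exact hv
    · rw [if_neg hs]
      by_cases hb : i = 0 ∧ j = 0
      · rw [if_pos hb]
        rw [PySem.Dict.get?_insert]
        by_cases hp : p = ((0:Nat), (0:Nat))
        · exfalso
          have hpij : p = (i, j) := by rw [hp, hb.1, hb.2]
          rw [hpij] at hv
          rw [hv] at hs
          simp at hs
        · rw [if_neg hp]; exact hv
      · rw [if_neg hb]
        simp only []
        have h1 : (if _h : 1 ≤ j then solveT a b i (j-1) M else M).get? p = some v := by
          by_cases hj : 1 ≤ j
          · rw [dif_pos hj]; exact ih i (j-1) (by omega) M p v hv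
          · rw [dif_neg hj]; exact hv
        have h2 : ((if _h : 1 ≤ i then solveT a b (i-1) j
            (if _h : 1 ≤ j then solveT a b i (j-1) M else M)
            else (if _h : 1 ≤ j then solveT a b i (j-1) M else M))).get? p = some v := by
          by_cases hi : 1 ≤ i
          · rw [dif_pos hi]; exact ih (i-1) j (by omega) _ p v h1
          · rw [dif_neg hi]; exact h1
        rw [PySem.Dict.get?_insert]
        by_cases hp : p = ((i:Nat), (j:Nat))
        · exfalso
          rw [hp] at hv
          rw [hv] at hs
          simp at hs
        · rw [if_neg hp]; exact h2

theorem solveT_inv (a b : List Int) : ∀ s i j, i + j ≤ s →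
    ∀ M, InvM a b M → InvM a b (solveT a b i j M) := by
  intro s
  induction s with
  | zero =>
    intro i j h M hM
    rw [solveT]
    by_cases hs : (M.get? (i, j)).isSome
    · rw [if_pos hs]; exact hM
    · have hb : i = 0 ∧ j = 0 := by omega
      rw [if_neg hs, if_pos hb]
      intro i' j' v hv
      rw [PySem.Dict.get?_insert] at hv
      by_cases hp : ((i':Nat), (j':Nat)) = ((0:Nat), (0:Nat))
      · rw [if_pos hp] at hv
        have hi' : i' = 0 := congrArg Prod.fst hp
        have hj' : j' = 0 := congrArg Prod.snd hp
        subst hi'; subst hj'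
        rw [F_zero]
        exact (Option.some_inj.mp hv).symm
      · rw [if_neg hp] at hv
        exact hM i' j' v hv
  | succ s ih =>
    intro i j h M hM
    rw [solveT]
    by_cases hs : (M.get? (i, j)).isSome
    · rw [if_pos hs]; exact hM
    · rw [if_neg hs]
      by_cases hb : i = 0 ∧ j = 0
      · rw [if_pos hb]
        intro i' j' v hv
        rw [PySem.Dict.get?_insert] at hv
        by_cases hp : ((i':Nat), (j':Nat)) = ((0:Nat), (0:Nat))
        · rw [if_pos hp] at hv
          have hi' : i' = 0 := congrArg Prod.fst hp
          have hj' : j' = 0 := congrArg Prod.snd hp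
          subst hi'; subst hj'
          rw [F_zero]
          exact (Option.some_inj.mp hv).symm
        · rw [if_neg hp] at hv
          exact hM i' j' v hv
      · rw [if_neg hb]
        simp only []
        have hM1 : InvM a b (if _h : 1 ≤ j then solveT a b i (j-1) M else M) := by
          by_cases hj : 1 ≤ j
          · rw [dif_pos hj]; exact ih i (j-1) (by omega) M hM
          · rw [dif_neg hj]; exact hM
        have hM2 : InvM a b (if _h : 1 ≤ i then solveT a b (i-1) j
            (if _h : 1 ≤ j then solveT a b i (j-1) M else M)
            else (if _h : 1 ≤ j then solveT a b i (j-1) M else M)) := by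
          by_cases hi : 1 ≤ i
          · rw [dif_pos hi]; exact ih (i-1) j (by omega) _ hM1
          · rw [dif_neg hi]; exact hM1
        intro i' j' v hv
        rw [PySem.Dict.get?_insert] at hv
        by_cases hp : ((i':Nat), (j':Nat)) = ((i:Nat), (j:Nat))
        · rw [if_pos hp] at hv
          have hi' : i' = i := congrArg Prod.fst hp
          have hj' : j' = j := congrArg Prod.snd hp
          subst hi'; subst hj'
          exact (Option.some_inj.mp hv).symm
        · rw [if_neg hp] at hv
          exact hM2 i' j' v hv

theorem solveT_self (a b : List Int) (i j : Nat) (M : PySem.Dict (Nat × Nat) (Option Int × Option Int))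
    (hM : InvM a b M) : (solveT a b i j M).get? (i, j) = some (F a b i j) := by
  rw [solveT]
  by_cases hs : (M.get? (i, j)).isSome
  · rw [if_pos hs]
    obtain ⟨v, hv⟩ := Option.isSome_iff_exists.mp hs
    rw [hv, hM i j v hv]
  · rw [if_neg hs]
    by_cases hb : i = 0 ∧ j = 0
    · rw [if_pos hb]
      obtain ⟨hi, hj⟩ := hb
      subst hi; subst hj
      rw [PySem.Dict.get?_insert_self, F_zero]
    · rw [if_neg hb]
      simp only []
      rw [PySem.Dict.get?_insert_self]

-- the machine simulates the reference recursion frame by frame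
theorem runM_eval (a b : List Int) : ∀ s i j, i + j ≤ s → ∀ k M, InvM a b M →
    runM a b (PvFrame.eval i j :: k) M = runM a b k (solveT a b i j M) := by
  intro s
  induction s with
  | zero =>
    intro i j h k M hM
    rw [runM, solveT]
    by_cases hs : (M.get? (i, j)).isSome
    · rw [if_pos hs, if_pos hs]
    · have hb : i = 0 ∧ j = 0 := by omega
      rw [if_neg hs, if_neg hs, if_pos hb, if_pos hb]
  | succ s ih =>
    intro i j h k M hM
    rw [runM]
    by_cases hs : (M.get? (i, j)).isSome
    · rw [if_pos hs]
      conv_rhs => rw [solveT]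
      rw [if_pos hs]
    · rw [if_neg hs]
      by_cases hb : i = 0 ∧ j = 0
      · rw [if_pos hb]
        conv_rhs => rw [solveT]
        rw [if_neg hs, if_pos hb]
      · rw [if_neg hb]
        conv_rhs => rw [solveT]
        rw [if_neg hs, if_neg hb]
        simp only []
        by_cases hj : 1 ≤ j <;> by_cases hi : 1 ≤ i
        · -- both children
          rw [if_pos hj, if_pos hi, dif_pos hj, dif_pos hi]
          have hM1 : InvM a b (solveT a b i (j-1) M) := solveT_inv a b (i+(j-1)) i (j-1) le_rfl M hM
          have hM2 : InvM a b (solveT a b (i-1) j (solveT a b i (j-1) M)) :=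
            solveT_inv a b ((i-1)+j) (i-1) j le_rfl _ hM1
          simp only [List.cons_append, List.nil_append, List.singleton_append, List.append_assoc]
          rw [ih i (j-1) (by omega) _ M hM]
          rw [ih (i-1) j (by omega) _ _ hM1]
          rw [runM]
          have hg1 : (solveT a b (i-1) j (solveT a b i (j-1) M)).get? (i-1, j) = some (F a b (i-1) j) :=
            solveT_self a b (i-1) j _ hM1
          have hg2 : (solveT a b (i-1) j (solveT a b i (j-1) M)).get? (i, j-1) = some (F a b i (j-1)) := by
            have := solveT_self a b i (j-1) M hM
            exact solveT_mono a b ((i-1)+j) (i-1) j le_rfl _ (i, j-1) _ this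
          simp only [hg1, hg2, Option.getD_some]
          congr 1
          conv_rhs => rw [F]
          rw [if_neg hb]
          simp [dif_pos hi, dif_pos hj, if_pos hi, if_pos hj]
        · -- only the j child
          rw [if_pos hj, if_neg hi, dif_pos hj, dif_neg hi]
          have hM1 : InvM a b (solveT a b i (j-1) M) := solveT_inv a b (i+(j-1)) i (j-1) le_rfl M hM
          simp only [List.cons_append, List.nil_append, List.singleton_append, List.append_assoc]
          rw [ih i (j-1) (by omega) _ M hM]
          rw [runM]
          have hg2 : (solveT a b i (j-1) M).get? (i, j-1) = some (F a b i (j-1)) :=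
            solveT_self a b i (j-1) M hM
          simp only [hg2, Option.getD_some]
          congr 1
          conv_rhs => rw [F]
          rw [if_neg hb]
          simp [dif_neg hi, dif_pos hj, if_neg hi, if_pos hj]
        · -- only the i child
          rw [if_neg hj, if_pos hi, dif_neg hj, dif_pos hi]
          have hM1 : InvM a b (solveT a b (i-1) j M) := solveT_inv a b ((i-1)+j) (i-1) j le_rfl M hM
          simp only [List.cons_append, List.nil_append, List.singleton_append, List.append_assoc]
          rw [ih (i-1) j (by omega) _ M hM]
          rw [runM]
          have hg1 : (solveT a b (i-1) j M).get? (i-1, j) = some (F a b (i-1) j) :=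
            solveT_self a b (i-1) j M hM
          simp only [hg1, Option.getD_some]
          congr 1
          conv_rhs => rw [F]
          rw [if_neg hb]
          simp [dif_pos hi, dif_neg hj, if_pos hi, if_neg hj]
        · omega

theorem alt_eq_F (a b : List Int) :
    solution_alt a b = (mnO (F a b a.length b.length).1 (F a b a.length b.length).2).getD 0 := by
  unfold solution_alt
  simp only []
  have hinv : InvM a b PySem.Dict.empty := by
    intro i j v hv
    simp [PySem.Dict.get?_empty] at hv
  rw [runM_eval a b (a.length + b.length) a.length b.length le_rfl [] PySem.Dict.empty hinv]
  rw [runM]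
  rw [solveT_self a b a.length b.length PySem.Dict.empty hinv]
  rfl

-- ===== A side =====
theorem cellSet_length (mat : List (List (Int × Int))) (i j : Nat) (v : Int × Int) :
    (cellSet mat i j v).length = mat.length := by
  simp [cellSet]

theorem row_cellSet_ne (mat : List (List (Int × Int))) (i j : Nat) (v : Int × Int) (i' : Nat) (h : i' ≠ i) :
    (cellSet mat i j v).getD i' [] = mat.getD i' [] := by
  simp [cellSet, List.getD_eq_getElem?_getD, List.getElem?_set_ne (Ne.symm h)]

theorem row_cellSet_self (mat : List (List (Int × Int))) (i j : Nat) (v : Int × Int) (hi : i < mat.length) :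
    (cellSet mat i j v).getD i [] = (mat.getD i []).set j v := by
  simp [cellSet, List.getD_eq_getElem?_getD, List.getElem?_set_self hi]

theorem cellGet_row_ne (mat : List (List (Int × Int))) (i j : Nat) (v : Int × Int) (i' j' : Nat) (h : i' ≠ i) :
    cellGet (cellSet mat i j v) i' j' = cellGet mat i' j' := by
  unfold cellGet; rw [row_cellSet_ne mat i j v i' h]

theorem cellGet_col_ne (mat : List (List (Int × Int))) (i j : Nat) (v : Int × Int) (j' : Nat)
    (hi : i < mat.length) (h : j' ≠ j) :
    cellGet (cellSet mat i j v) i j' = cellGet mat i j' := by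
  unfold cellGet
  rw [row_cellSet_self mat i j v hi]
  simp [List.getD_eq_getElem?_getD, List.getElem?_set_ne (Ne.symm h)]

theorem cellGet_self (mat : List (List (Int × Int))) (i j : Nat) (v : Int × Int)
    (hi : i < mat.length) (hj : j < (mat.getD i []).length) :
    cellGet (cellSet mat i j v) i j = v := by
  unfold cellGet
  rw [row_cellSet_self mat i j v hi]
  rw [List.getD_eq_getElem?_getD, List.getElem?_set_self (by simpa using hj)]
  rfl

def ShapeM (a b : List Int) (mat : List (List (Int × Int))) : Prop :=
  mat.length = a.length + 1 ∧ ∀ i, i ≤ a.length → (mat.getD i []).length = b.length + 1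

theorem ShapeM_cellSet (a b : List Int) (mat : List (List (Int × Int))) (i j : Nat) (v : Int × Int)
    (h : ShapeM a b mat) : ShapeM a b (cellSet mat i j v) := by
  obtain ⟨hlen, hrows⟩ := h
  refine ⟨by rw [cellSet_length, hlen], ?_⟩
  intro i' hi'
  by_cases he : i' = i
  · subst he
    rw [row_cellSet_self mat i' j v (by omega)]
    rw [List.length_set]
    exact hrows i' hi'
  · rw [row_cellSet_ne mat i j v i' he]
    exact hrows i' hi'

theorem matP2_spec (a b : List Int) (hn : 1 ≤ a.length) (hm : 1 ≤ b.length) :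
    ShapeM a b (matP2 a b) ∧ cellGet (matP2 a b) 1 0 = G a b 1 0 ∧ cellGet (matP2 a b) 0 1 = G a b 0 1 := by
  have hsh0 : ShapeM a b (List.replicate (a.length+1) (List.replicate (b.length+1) ((0, 0) : Int × Int))) := by
    constructor
    · simp
    · intro i hi
      rw [List.getD_eq_getElem?_getD]
      rw [List.getElem?_replicate_of_lt (by omega)]
      simp
  have hrow0 : ∀ i ≤ a.length,
      (List.replicate (a.length+1) (List.replicate (b.length+1) ((0, 0) : Int × Int))).getD i []
        = List.replicate (b.length+1) ((0, 0) : Int × Int) := by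
    intro i hi
    rw [List.getD_eq_getElem?_getD, List.getElem?_replicate_of_lt (by omega)]
    rfl
  refine ⟨ShapeM_cellSet a b _ 0 1 _ (ShapeM_cellSet a b _ 1 0 _ hsh0), ?_, ?_⟩
  · unfold matP2
    rw [cellGet_row_ne _ 0 1 _ 1 0 (by omega)]
    rw [cellGet_self _ 1 0 _ (by simp; omega) (by rw [hrow0 1 hn]; simp)]
    rw [G]; simp
  · unfold matP2
    rw [cellGet_self _ 0 1 _ (by rw [cellSet_length]; simp) (by rw [row_cellSet_ne _ 1 0 _ 0 (by omega), hrow0 0 (by omega)]; simp; omega)]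
    rw [G]; simp

theorem matP3_aux (a b : List Int) (hn : 1 ≤ a.length) (hm : 1 ≤ b.length) :
    ∀ k, k ≤ a.length - 1 →
      ShapeM a b ((List.range' 2 k).foldl (colStep a) (matP2 a b)) ∧
      (∀ i, 1 ≤ i → i ≤ k+1 → cellGet ((List.range' 2 k).foldl (colStep a) (matP2 a b)) i 0 = G a b i 0) ∧
      cellGet ((List.range' 2 k).foldl (colStep a) (matP2 a b)) 0 1 = G a b 0 1 := by
  intro k
  induction k with
  | zero =>
    intro _
    obtain ⟨hsh, h10, h01⟩ := matP2_spec a b hn hm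
    exact ⟨hsh, by intro i h1 h2; have : i = 1 := by omega
                   subst this; exact h10, h01⟩
  | succ k ih =>
    intro hk
    obtain ⟨hsh, hcol, h01⟩ := ih (by omega)
    rw [List.range'_concat, List.foldl_append, List.foldl_cons, List.foldl_nil]
    simp only [one_mul]
    set mat := (List.range' 2 k).foldl (colStep a) (matP2 a b) with hmat
    have hlen : mat.length = a.length + 1 := hsh.1
    have hval : cellGet mat (2 + k - 1) 0 = G a b (k+1) 0 := by
      rw [show 2 + k - 1 = k + 1 from by omega]
      exact hcol (k+1) (by omega) (by omega)
    refine ⟨ShapeM_cellSet a b mat _ _ _ hsh, ?_, ?_⟩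
    · intro i h1 h2
      by_cases he : i = 2 + k
      · subst he
        unfold colStep
        rw [cellGet_self mat _ 0 _ (by omega) (by rw [hsh.2 (2+k) (by omega)]; omega)]
        rw [hval]
        rw [show G a b (2+k) 0 = ((G a b (2+k-1) 0).1 + pyAbs (elt a (2+k-1) - elt a (2+k-2)),
             (G a b (2+k-1) 0).1 + pyAbs (elt a (2+k-1) - elt a (2+k-2))) from by
          conv_lhs => rw [G]
          simp [show ¬ (2+k = 0) from by omega, show ¬ (2+k = 1) from by omega]]
        rw [show 2 + k - 1 = k + 1 from by omega, show 2 + k - 2 = k from by omega]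
        rw [← G_col0_dup a b (k+1)]
      · unfold colStep
        rw [cellGet_row_ne mat _ 0 _ i 0 he]
        exact hcol i h1 (by omega)
    · unfold colStep
      rw [cellGet_row_ne mat _ 0 _ 0 1 (by omega)]
      exact h01

theorem matP4_aux (a b : List Int) (hn : 1 ≤ a.length) (hm : 1 ≤ b.length) :
    ∀ k, k ≤ b.length - 1 →
      ShapeM a b ((List.range' 2 k).foldl (row0Step b) (matP3 a b)) ∧
      (∀ i, 1 ≤ i → i ≤ a.length → cellGet ((List.range' 2 k).foldl (row0Step b) (matP3 a b)) i 0 = G a b i 0) ∧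
      (∀ j, 1 ≤ j → j ≤ k+1 → cellGet ((List.range' 2 k).foldl (row0Step b) (matP3 a b)) 0 j = G a b 0 j) := by
  intro k
  induction k with
  | zero =>
    intro _
    obtain ⟨hsh, hcol, h01⟩ := matP3_aux a b hn hm (a.length - 1) (by omega)
    refine ⟨hsh, ?_, ?_⟩
    · intro i h1 h2; exact hcol i h1 (by omega)
    · intro j h1 h2; have : j = 1 := by omega
      subst this; exact h01
  | succ k ih =>
    intro hk
    obtain ⟨hsh, hcol, hrow⟩ := ih (by omega)
    rw [List.range'_concat, List.foldl_append, List.foldl_cons, List.foldl_nil]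
    simp only [one_mul]
    set mat := (List.range' 2 k).foldl (row0Step b) (matP3 a b) with hmat
    have hlen : mat.length = a.length + 1 := hsh.1
    have hval : cellGet mat 0 (2 + k - 1) = G a b 0 (k+1) := by
      rw [show 2 + k - 1 = k + 1 from by omega]
      exact hrow (k+1) (by omega) (by omega)
    refine ⟨ShapeM_cellSet a b mat _ _ _ hsh, ?_, ?_⟩
    · intro i h1 h2
      unfold row0Step
      rw [cellGet_row_ne mat 0 _ _ i _ (by omega)]
      exact hcol i h1 h2
    · intro j h1 h2
      by_cases he : j = 2 + k
      · subst he
        unfold row0Step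
        rw [cellGet_self mat 0 _ _ (by omega) (by rw [hsh.2 0 (by omega)]; omega)]
        rw [hval]
        rw [show G a b 0 (2+k) = ((G a b 0 (2+k-1)).2 + pyAbs (elt b (2+k-1) - elt b (2+k-2)),
             (G a b 0 (2+k-1)).2 + pyAbs (elt b (2+k-1) - elt b (2+k-2))) from by
          conv_lhs => rw [G]
          simp [show ¬ (2+k = 0) from by omega, show ¬ (2+k = 1) from by omega]]
        rw [show 2 + k - 1 = k + 1 from by omega, show 2 + k - 2 = k from by omega]
      · unfold row0Step
        rw [cellGet_col_ne mat 0 _ _ j (by omega) he]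
        exact hrow j h1 (by omega)

theorem cellGet_ne2 (mat : List (List (Int × Int))) (i j : Nat) (v : Int × Int) (i' j' : Nat)
    (hlen : i < mat.length) (h : i' ≠ i ∨ j' ≠ j) :
    cellGet (cellSet mat i j v) i' j' = cellGet mat i' j' := by
  by_cases he : i' = i
  · subst he
    rcases h with h | h
    · exact absurd rfl h
    · exact cellGet_col_ne mat i' j v j' hlen h
  · exact cellGet_row_ne mat i j v i' j' he

theorem matP6_spec (a b : List Int) (hn : 1 ≤ a.length) (hm : 1 ≤ b.length) :
    ShapeM a b (matP6 a b) ∧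
    (∀ i, 1 ≤ i → i ≤ a.length → cellGet (matP6 a b) i 0 = G a b i 0) ∧
    (∀ j, 1 ≤ j → j ≤ b.length → cellGet (matP6 a b) 0 j = G a b 0 j) ∧
    cellGet (matP6 a b) 1 1 = G a b 1 1 := by
  obtain ⟨hsh, hcol, hrow⟩ := matP4_aux a b hn hm (b.length - 1) (by omega)
  rw [show (List.range' 2 (b.length - 1)).foldl (row0Step b) (matP3 a b) = matP4 a b from rfl]
    at hsh hcol hrow
  have hlen : (matP4 a b).length = a.length + 1 := hsh.1
  unfold matP6
  set m5 := cellSet (matP4 a b) 1 1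
    ((cellGet (matP4 a b) 0 1).1 + pyAbs (elt a 0 - elt b 0), (cellGet (matP4 a b) 1 1).2) with hm5
  have hsh5 : ShapeM a b m5 := ShapeM_cellSet a b _ 1 1 _ hsh
  have hlen5 : m5.length = a.length + 1 := hsh5.1
  refine ⟨ShapeM_cellSet a b _ 1 1 _ hsh5, ?_, ?_, ?_⟩
  · intro i h1 h2
    rw [cellGet_ne2 m5 1 1 _ i 0 (by omega) (Or.inr (by omega))]
    rw [hm5, cellGet_ne2 _ 1 1 _ i 0 (by omega) (Or.inr (by omega))]
    exact hcol i h1 h2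
  · intro j h1 h2
    rw [cellGet_ne2 m5 1 1 _ 0 j (by omega) (Or.inl (by omega))]
    rw [hm5, cellGet_ne2 _ 1 1 _ 0 j (by omega) (Or.inl (by omega))]
    exact hrow j h1 (by omega)
  · rw [cellGet_self m5 1 1 _ (by omega) (by rw [hsh5.2 1 hn]; omega)]
    have e1 : cellGet m5 1 1 = ((cellGet (matP4 a b) 0 1).1 + pyAbs (elt a 0 - elt b 0), (cellGet (matP4 a b) 1 1).2) := by
      rw [hm5, cellGet_self _ 1 1 _ (by omega) (by rw [hsh.2 1 hn]; omega)]
    have e2 : cellGet m5 1 0 = cellGet (matP4 a b) 1 0 := by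
      rw [hm5, cellGet_ne2 _ 1 1 _ 1 0 (by omega) (Or.inr (by omega))]
    rw [e1, e2, hrow 1 (by omega) (by omega), hcol 1 (by omega) hn]
    conv_rhs => rw [G]
    simp

theorem matP7_aux (a b : List Int) (hn : 1 ≤ a.length) (hm : 1 ≤ b.length) :
    ∀ k, k ≤ b.length - 1 →
      ShapeM a b ((List.range' 2 k).foldl (row1Step a b) (matP6 a b)) ∧
      (∀ i, 1 ≤ i → i ≤ a.length → cellGet ((List.range' 2 k).foldl (row1Step a b) (matP6 a b)) i 0 = G a b i 0) ∧
      (∀ j, 1 ≤ j → j ≤ b.length → cellGet ((List.range' 2 k).foldl (row1Step a b) (matP6 a b)) 0 j = G a b 0 j) ∧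
      (∀ j, 1 ≤ j → j ≤ k+1 → cellGet ((List.range' 2 k).foldl (row1Step a b) (matP6 a b)) 1 j = G a b 1 j) := by
  intro k
  induction k with
  | zero =>
    intro _
    obtain ⟨hsh, hcol, hrow, h11⟩ := matP6_spec a b hn hm
    refine ⟨hsh, hcol, hrow, ?_⟩
    intro j h1 h2
    have : j = 1 := by omega
    subst this
    exact h11
  | succ k ih =>
    intro hk
    obtain ⟨hsh, hcol, hrow, hr1⟩ := ih (by omega)
    rw [List.range'_concat, List.foldl_append, List.foldl_cons, List.foldl_nil]
    simp only [one_mul]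
    set mat := (List.range' 2 k).foldl (row1Step a b) (matP6 a b) with hmat
    have hlen : mat.length = a.length + 1 := hsh.1
    unfold row1Step
    set x := (cellGet mat 0 (2+k)).2 + pyAbs (elt a 0 - elt b (2+k-1)) with hx
    set mA := cellSet mat 1 (2+k) (x, (cellGet mat 1 (2+k)).2) with hmA
    have hshA : ShapeM a b mA := ShapeM_cellSet a b _ 1 (2+k) _ hsh
    have hlenA : mA.length = a.length + 1 := hshA.1
    refine ⟨ShapeM_cellSet a b _ 1 (2+k) _ hshA, ?_, ?_, ?_⟩
    · intro i h1 h2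
      rw [cellGet_ne2 mA 1 (2+k) _ i 0 (by omega) (Or.inr (by omega))]
      rw [hmA, cellGet_ne2 mat 1 (2+k) _ i 0 (by omega) (Or.inr (by omega))]
      exact hcol i h1 h2
    · intro j h1 h2
      rw [cellGet_ne2 mA 1 (2+k) _ 0 j (by omega) (Or.inl (by omega))]
      rw [hmA, cellGet_ne2 mat 1 (2+k) _ 0 j (by omega) (Or.inl (by omega))]
      exact hrow j h1 h2
    · intro j h1 h2
      by_cases he : j = 2 + k
      · subst he
        rw [cellGet_self mA 1 (2+k) _ (by omega) (by rw [hshA.2 1 hn]; omega)]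
        have eA1 : cellGet mA 1 (2+k) = (x, (cellGet mat 1 (2+k)).2) := by
          rw [hmA, cellGet_self mat 1 (2+k) _ (by omega) (by rw [hsh.2 1 hn]; omega)]
        have eA2 : cellGet mA 1 (2+k-1) = cellGet mat 1 (2+k-1) := by
          rw [hmA, cellGet_ne2 mat 1 (2+k) _ 1 (2+k-1) (by omega) (Or.inr (by omega))]
        rw [eA1, eA2]
        rw [show 2+k-1 = k+1 from by omega]
        rw [hr1 (k+1) (by omega) (by omega)]
        rw [hx, hrow (2+k) (by omega) (by omega)]
        conv_rhs => rw [G]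
        simp only [show ¬ (2+k = 0) from by omega, show (2:Nat)+k ≠ 1 from by omega, if_neg, if_false,
          reduceIte]
        rw [show 2+k-1 = k+1 from by omega, show 2+k-2 = k from by omega]
        simp
      · rw [cellGet_ne2 mA 1 (2+k) _ 1 j (by omega) (Or.inr he)]
        rw [hmA, cellGet_ne2 mat 1 (2+k) _ 1 j (by omega) (Or.inr he)]
        exact hr1 j h1 (by omega)

theorem matP8_inner (a b : List Int) (hn : 1 ≤ a.length) (hm : 1 ≤ b.length) (i : Nat)
    (h2i : 2 ≤ i) (hin : i ≤ a.length) (mat0 : List (List (Int × Int))) (hsh0 : ShapeM a b mat0)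
    (hprev : ∀ i', 1 ≤ i' → i' < i → ∀ j, 1 ≤ j → j ≤ b.length → cellGet mat0 i' j = G a b i' j)
    (hcol : ∀ i', 1 ≤ i' → i' ≤ a.length → cellGet mat0 i' 0 = G a b i' 0)
    (hrow0 : ∀ j, 1 ≤ j → j ≤ b.length → cellGet mat0 0 j = G a b 0 j)
    (hi1 : cellGet mat0 i 1 = G a b i 1) :
    ∀ t, t ≤ b.length - 1 →
      ShapeM a b ((List.range' 2 t).foldl (cellStep a b i) mat0) ∧
      (∀ i', 1 ≤ i' → i' < i → ∀ j, 1 ≤ j → j ≤ b.length →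
        cellGet ((List.range' 2 t).foldl (cellStep a b i) mat0) i' j = G a b i' j) ∧
      (∀ i', 1 ≤ i' → i' ≤ a.length → cellGet ((List.range' 2 t).foldl (cellStep a b i) mat0) i' 0 = G a b i' 0) ∧
      (∀ j, 1 ≤ j → j ≤ b.length → cellGet ((List.range' 2 t).foldl (cellStep a b i) mat0) 0 j = G a b 0 j) ∧
      (∀ j, 1 ≤ j → j ≤ t+1 → cellGet ((List.range' 2 t).foldl (cellStep a b i) mat0) i j = G a b i j) := by
  intro t
  induction t with
  | zero =>
    intro _
    refine ⟨hsh0, hprev, hcol, hrow0, ?_⟩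
    intro j h1 h2
    have : j = 1 := by omega
    subst this
    exact hi1
  | succ t ih =>
    intro ht
    obtain ⟨hsh, hpr, hc, hr0, hri⟩ := ih (by omega)
    rw [List.range'_concat, List.foldl_append, List.foldl_cons, List.foldl_nil]
    simp only [one_mul]
    set mt := (List.range' 2 t).foldl (cellStep a b i) mat0 with hmt
    have hlen : mt.length = a.length + 1 := hsh.1
    unfold cellStep
    set z := min ((cellGet mt (i-1) (2+t)).1 + pyAbs (elt a (i-1) - elt a (i-2)))
             ((cellGet mt (i-1) (2+t)).2 + pyAbs (elt a (i-1) - elt b (2+t-1))) with hz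
    set m3 := cellSet mt i (2+t) (z, (cellGet mt i (2+t)).2) with hm3
    have hsh3 : ShapeM a b m3 := ShapeM_cellSet a b _ i (2+t) _ hsh
    have hlen3 : m3.length = a.length + 1 := hsh3.1
    refine ⟨ShapeM_cellSet a b _ i (2+t) _ hsh3, ?_, ?_, ?_, ?_⟩
    · intro i' h1 h2 j hj1 hj2
      rw [cellGet_ne2 m3 i (2+t) _ i' j (by omega) (Or.inl (by omega))]
      rw [hm3, cellGet_ne2 mt i (2+t) _ i' j (by omega) (Or.inl (by omega))]
      exact hpr i' h1 h2 j hj1 hj2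
    · intro i' h1 h2
      rw [cellGet_ne2 m3 i (2+t) _ i' 0 (by omega) (Or.inr (by omega))]
      rw [hm3, cellGet_ne2 mt i (2+t) _ i' 0 (by omega) (Or.inr (by omega))]
      exact hc i' h1 h2
    · intro j h1 h2
      rw [cellGet_ne2 m3 i (2+t) _ 0 j (by omega) (Or.inl (by omega))]
      rw [hm3, cellGet_ne2 mt i (2+t) _ 0 j (by omega) (Or.inl (by omega))]
      exact hr0 j h1 h2
    · intro j h1 h2
      by_cases he : j = 2 + t
      · subst he
        rw [cellGet_self m3 i (2+t) _ (by omega) (by rw [hsh3.2 i hin]; omega)]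
        have e3 : cellGet m3 i (2+t) = (z, (cellGet mt i (2+t)).2) := by
          rw [hm3, cellGet_self mt i (2+t) _ (by omega) (by rw [hsh.2 i hin]; omega)]
        have e4 : cellGet m3 i (2+t-1) = cellGet mt i (2+t-1) := by
          rw [hm3, cellGet_ne2 mt i (2+t) _ i (2+t-1) (by omega) (Or.inr (by omega))]
        rw [e3, e4]
        rw [show 2+t-1 = t+1 from by omega]
        rw [hri (t+1) (by omega) (by omega)]
        rw [hz]
        rw [hpr (i-1) (by omega) (by omega) (2+t) (by omega) (by omega)]
        conv_rhs => rw [G]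
        simp only [show ¬ (i = 0) from by omega, show i ≠ 1 from by omega,
          show ¬ ((2:Nat)+t = 0) from by omega, show (2:Nat)+t ≠ 1 from by omega,
          if_neg, if_false, reduceIte]
        rw [show 2+t-1 = t+1 from by omega, show 2+t-2 = t from by omega]
      · rw [cellGet_ne2 m3 i (2+t) _ i j (by omega) (Or.inr he)]
        rw [hm3, cellGet_ne2 mt i (2+t) _ i j (by omega) (Or.inr he)]
        exact hri j h1 (by omega)

theorem matP8_aux (a b : List Int) (hn : 1 ≤ a.length) (hm : 1 ≤ b.length) :
    ∀ k, k ≤ a.length - 1 →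
      ShapeM a b ((List.range' 2 k).foldl (rowStep a b) (matP7 a b)) ∧
      (∀ i, 1 ≤ i → i ≤ k+1 → ∀ j, 1 ≤ j → j ≤ b.length →
        cellGet ((List.range' 2 k).foldl (rowStep a b) (matP7 a b)) i j = G a b i j) ∧
      (∀ i, 1 ≤ i → i ≤ a.length → cellGet ((List.range' 2 k).foldl (rowStep a b) (matP7 a b)) i 0 = G a b i 0) ∧
      (∀ j, 1 ≤ j → j ≤ b.length → cellGet ((List.range' 2 k).foldl (rowStep a b) (matP7 a b)) 0 j = G a b 0 j) := by
  intro k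
  induction k with
  | zero =>
    intro _
    obtain ⟨hsh, hcol, hrow, hr1⟩ := matP7_aux a b hn hm (b.length - 1) (by omega)
    rw [show (List.range' 2 (b.length - 1)).foldl (row1Step a b) (matP6 a b) = matP7 a b from rfl]
      at hsh hcol hrow hr1
    refine ⟨hsh, ?_, hcol, hrow⟩
    intro i h1 h2 j hj1 hj2
    have : i = 1 := by omega
    subst this
    exact hr1 j hj1 (by omega)
  | succ k ih =>
    intro hk
    obtain ⟨hsh, hrows, hcol, hrow0⟩ := ih (by omega)
    rw [List.range'_concat, List.foldl_append, List.foldl_cons, List.foldl_nil]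
    simp only [one_mul]
    set mat := (List.range' 2 k).foldl (rowStep a b) (matP7 a b) with hmat
    have hlen : mat.length = a.length + 1 := hsh.1
    unfold rowStep
    set x1 := min ((cellGet mat (2+k-1) 1).1 + pyAbs (elt a (2+k-1) - elt a (2+k-2)))
              ((cellGet mat (2+k-1) 1).2 + pyAbs (elt a (2+k-1) - elt b 0)) with hx1
    set m1 := cellSet mat (2+k) 1 (x1, (cellGet mat (2+k) 1).2) with hm1
    have hsh1 : ShapeM a b m1 := ShapeM_cellSet a b _ (2+k) 1 _ hsh
    have hlen1 : m1.length = a.length + 1 := hsh1.1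
    set m2 := cellSet m1 (2+k) 1 ((cellGet m1 (2+k) 1).1, (cellGet m1 (2+k) 0).1 + pyAbs (elt b 0 - elt a (2+k-1))) with hm2
    have hsh2 : ShapeM a b m2 := ShapeM_cellSet a b _ (2+k) 1 _ hsh1
    have hin : 2 + k ≤ a.length := by omega
    have e1 : cellGet m1 (2+k) 1 = (x1, (cellGet mat (2+k) 1).2) := by
      rw [hm1, cellGet_self mat (2+k) 1 _ (by omega) (by rw [hsh.2 (2+k) hin]; omega)]
    have e2 : cellGet m1 (2+k) 0 = cellGet mat (2+k) 0 := by
      rw [hm1, cellGet_ne2 mat (2+k) 1 _ (2+k) 0 (by omega) (Or.inr (by omega))]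
    have ei1 : cellGet m2 (2+k) 1 = G a b (2+k) 1 := by
      rw [hm2, cellGet_self m1 (2+k) 1 _ (by omega) (by rw [hsh1.2 (2+k) hin]; omega)]
      rw [e1, e2]
      rw [hx1, hcol (2+k) (by omega) hin]
      rw [show 2+k-1 = k+1 from by omega]
      rw [hrows (k+1) (by omega) (by omega) 1 (by omega) hm]
      conv_rhs => rw [G]
      simp only [show ¬ ((2:Nat)+k = 0) from by omega, show (2:Nat)+k ≠ 1 from by omega,
        if_neg, if_false, reduceIte]
      rw [show 2+k-1 = k+1 from by omega, show 2+k-2 = k from by omega]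
      simp
    have hprev2 : ∀ i', 1 ≤ i' → i' < 2+k → ∀ j, 1 ≤ j → j ≤ b.length → cellGet m2 i' j = G a b i' j := by
      intro i' h1 h2 j hj1 hj2
      rw [hm2, cellGet_ne2 m1 (2+k) 1 _ i' j (by omega) (Or.inl (by omega))]
      rw [hm1, cellGet_ne2 mat (2+k) 1 _ i' j (by omega) (Or.inl (by omega))]
      exact hrows i' h1 (by omega) j hj1 hj2
    have hcol2 : ∀ i', 1 ≤ i' → i' ≤ a.length → cellGet m2 i' 0 = G a b i' 0 := by
      intro i' h1 h2
      rw [hm2, cellGet_ne2 m1 (2+k) 1 _ i' 0 (by omega) (Or.inr (by omega))]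
      rw [hm1, cellGet_ne2 mat (2+k) 1 _ i' 0 (by omega) (Or.inr (by omega))]
      exact hcol i' h1 h2
    have hrow02 : ∀ j, 1 ≤ j → j ≤ b.length → cellGet m2 0 j = G a b 0 j := by
      intro j h1 h2
      rw [hm2, cellGet_ne2 m1 (2+k) 1 _ 0 j (by omega) (Or.inl (by omega))]
      rw [hm1, cellGet_ne2 mat (2+k) 1 _ 0 j (by omega) (Or.inl (by omega))]
      exact hrow0 j h1 h2
    obtain ⟨hshF, hprF, hcF, hr0F, hriF⟩ :=
      matP8_inner a b hn hm (2+k) (by omega) hin m2 hsh2 hprev2 hcol2 hrow02 ei1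
        (b.length - 1) (by omega)
    refine ⟨hshF, ?_, hcF, hr0F⟩
    intro i h1 h2 j hj1 hj2
    by_cases he : i = 2 + k
    · subst he
      exact hriF j hj1 (by omega)
    · exact hprF i h1 (by omega) j hj1 hj2

theorem matP8_eq_G (a b : List Int) (hn : 1 ≤ a.length) (hm : 1 ≤ b.length) :
    cellGet (matP8 a b) a.length b.length = G a b a.length b.length := by
  obtain ⟨hsh, hrows, hcol, hrow0⟩ := matP8_aux a b hn hm (a.length - 1) (by omega)
  rw [show (List.range' 2 (a.length - 1)).foldl (rowStep a b) (matP7 a b) = matP8 a b from rfl]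
    at hrows
  exact hrows a.length hn (by omega) b.length hm le_rfl

-- ===== VERDICT (by name: the statement is the Claim_ definition above) =====
theorem solution_spec : Claim_equal_solution := by
  intro a b _dom
  unfold Spec_solution
  rw [alt_eq_F a b, F_eq_G]
  rcases Nat.eq_zero_or_pos a.length with hn | hn
  · rcases Nat.eq_zero_or_pos b.length with hm | hm
    · rw [solution]
      simp [hn, hm, mnO, G]
    · rw [solution]
      simp [hn, Nat.pos_iff_ne_zero.mp hm, mnO, hm, chainA_eq_G_row a b hm,
        show (1:Nat) ≤ b.length from hm]
  · rcases Nat.eq_zero_or_pos b.length with hm | hm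
    · have hb : b = [] := List.length_eq_zero_iff.mp hm
      subst hb
      rw [solution, solution]
      simp [Nat.pos_iff_ne_zero.mp hn, mnO, show (1:Nat) ≤ a.length from hn,
        chainA_eq_G_col a [] hn]
    · rw [solution]
      simp [Nat.pos_iff_ne_zero.mp hn, Nat.pos_iff_ne_zero.mp hm, hn, hm, mnO,
        mainA, matP8_eq_G a b hn hm]
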